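-- pv_equiv track=rewrite | github.com/murilo-1234/winegod-app | backend/tools/media.py | _deduplicate_wines
-- ===== SOURCE A (Python) =====
-- def _deduplicate_wines(all_wines):
--     """Deduplicate wines by (normalized name, normalized producer).
--
--     Chave inclui produtor porque em cartas de vinho nomes genericos como
--     'Brut Reserve', 'Brunello', 'Chardonnay' aparecem para multiplos produtores
--     distintos. Chavear so por nome colapsava esses como 1 unico vinho e
--     derrubava ate 38% de uma carta real (Elephante: 184 -> 113). Vinhos com
--     produtor ausente em ambos ainda colapsam (compat com merge de info parcial).
--     """
--     seen = {}
--     for wine in all_wines: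
--         name = (wine.get("name") or "").strip().lower()
--         if not name:
--             continue
--         producer = (wine.get("producer") or "").strip().lower()
--         key = (name, producer)
--         if key not in seen:
--             seen[key] = wine
--         else:
--             existing = seen[key]
--             for k in wine:
--                 if wine[k] and not existing.get(k):
--                     existing[k] = wine[k]
--     return list(seen.values())
-- ===== SOURCE B (Python) =====
-- def _wine_key(wine):
--     """Normalized (name, producer) key, or None for wines with empty name."""
--     name = (wine.get("name") or "").strip().lower()
--     if not name:
--         return None
--     return (name, (wine.get("producer") or "").strip().lower())
--
--
-- def _deduplicate_wines(all_wines):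
--     """Dict-free nested-scan rewrite: one pass collects the distinct keys in
--     first-appearance order, then for each key a scan over all_wines folds the
--     matching wines into the first one (mutating it in place, like A does)."""
--     keys = []
--     for wine in all_wines:
--         k = _wine_key(wine)
--         if k is not None and k not in keys:
--             keys.append(k)
--     result = []
--     for key in keys:
--         merged = None
--         for wine in all_wines:
--             if _wine_key(wine) == key:
--                 if merged is None:
--                     merged = wine
--                 else:
--                     for f, v in wine.items():
--                         if v and not merged.get(f):
--                             merged[f] = v
--         result.append(merged)
--     return result
-- ===== Notes on version B (the rewrite author's own statement) =====
-- stated objective: alternative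
-- what changed: A deduplicates in a single pass over a dict of already-merged wines, merging each duplicate into the stored entry as it is encountered; B is dict-free: one scan collects the distinct normalized (name, producer) keys in first-appearance order, then for each key a second scan over all_wines folds every matching wine into the first one.
import Mathlib
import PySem

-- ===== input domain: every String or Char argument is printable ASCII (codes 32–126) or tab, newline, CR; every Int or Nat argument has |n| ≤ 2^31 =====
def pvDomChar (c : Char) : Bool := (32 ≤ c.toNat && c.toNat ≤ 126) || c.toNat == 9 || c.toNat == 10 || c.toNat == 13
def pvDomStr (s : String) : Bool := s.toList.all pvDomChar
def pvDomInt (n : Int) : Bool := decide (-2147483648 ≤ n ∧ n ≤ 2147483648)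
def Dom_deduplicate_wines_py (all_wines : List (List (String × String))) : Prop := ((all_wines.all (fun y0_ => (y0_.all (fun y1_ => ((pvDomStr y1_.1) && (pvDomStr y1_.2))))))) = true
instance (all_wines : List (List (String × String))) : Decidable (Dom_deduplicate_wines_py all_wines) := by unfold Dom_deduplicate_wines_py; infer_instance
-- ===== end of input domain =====

-- B replaces A's merge-on-insert dict pass with a dict-free decomposition: one scan collects the distinct
-- (normalized name, producer) keys in first-appearance order, then a per-key scan folds the matching wines
-- into the first one; same asymptotics are NOT claimed (B is O(n^2) scans vs A's dict pass) — objective is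
-- an alternative structure. A mutates the first wine dict of each key in place (B mutates the same dict);
-- the equivalence proved is about the RETURN value.


-- ===== PORT A =====
-- inner 'for k in wine: if wine[k] and not existing.get(k): existing[k] = wine[k]' loop;
-- the Python mutates 'existing' in place, modeled as overwrite-in-place via Dict.insert
def pvAMergeLoop (existing w : PySem.Dict String String) : PySem.Dict String String :=
  w.keys.foldl (fun ex k =>
    if (w.getD k "" != "") && (ex.getD k "" == "") then ex.insert k (w.getD k "") else ex) existing

-- one iteration of A's loop over all_wines; '(wine.get("name") or "")' is '.get? … |>.getD ""'
-- (exact: None and "" are both falsy and both yield "")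
def pvAStep (seen : PySem.Dict (String × String) (PySem.Dict String String))
    (wine : List (String × String)) : PySem.Dict (String × String) (PySem.Dict String String) :=
  let w := PySem.Dict.ofList wine
  let name := PySem.Str.lower (PySem.Str.strip ((w.get? "name").getD ""))
  if name = "" then seen  -- 'if not name: continue'
  else
    let producer := PySem.Str.lower (PySem.Str.strip ((w.get? "producer").getD ""))
    let key := (name, producer)
    if !(seen.contains key) then seen.insert key w
    else seen.insert key (pvAMergeLoop (seen.getD key PySem.Dict.empty) w)

def deduplicate_wines_py (all_wines : List (List (String × String))) : List (List (String × String)) :=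
  (all_wines.foldl pvAStep PySem.Dict.empty).values.map (fun d => d.items)

-- ===== PORT B =====
-- Source B's '_wine_key': normalized (name, producer) key, or None for wines with empty name
def pvWineKey (wine : List (String × String)) : Option (String × String) :=
  let w := PySem.Dict.ofList wine
  let name := PySem.Str.lower (PySem.Str.strip ((w.get? "name").getD ""))
  if name = "" then none
  else some (name, PySem.Str.lower (PySem.Str.strip ((w.get? "producer").getD "")))

-- Source B's key-collecting loop body: 'if k is not None and k not in keys: keys.append(k)'
def pvBKeyStep (ks : List (String × String)) (wine : List (String × String)) : List (String × String) :=
  match pvWineKey wine with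
  | none => ks
  | some k => if ks.contains k then ks else ks ++ [k]

-- Source B's 'for f, v in wine.items(): if v and not merged.get(f): merged[f] = v'
def pvBMergeFields (merged w : PySem.Dict String String) : PySem.Dict String String :=
  w.items.foldl (fun m fv =>
    if (fv.2 != "") && (m.getD fv.1 "" == "") then m.insert fv.1 fv.2 else m) merged

-- one step of Source B's inner per-key scan: 'if merged is None: merged = wine else: <merge fields>'
def pvBMergeOpt (merged : Option (PySem.Dict String String)) (w : PySem.Dict String String) :
    Option (PySem.Dict String String) :=
  match merged with
  | none => some w
  | some m => some (pvBMergeFields m w)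

def deduplicate_wines_py_alt (all_wines : List (List (String × String))) : List (List (String × String)) :=
  -- pass 1: distinct keys in first-appearance order
  let keys := all_wines.foldl pvBKeyStep []
  -- pass 2: per key, scan all_wines and fold the matching wines into the first ('merged')
  keys.map (fun key =>
    match all_wines.foldl (fun acc wine =>
      if pvWineKey wine == some key then pvBMergeOpt acc (PySem.Dict.ofList wine) else acc) none with
    | none => []   -- unreachable: every collected key has at least one matching wine
    | some m => m.items)

-- ===== PRECONDITION & SPEC =====
def Spec_deduplicate_wines_py (all_wines : List (List (String × String))) (out : List (List (String × String))) : Prop := out = deduplicate_wines_py_alt all_wines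
instance (all_wines : List (List (String × String))) (out : List (List (String × String))) : Decidable (Spec_deduplicate_wines_py all_wines out) := by unfold Spec_deduplicate_wines_py; infer_instance

-- ===== CLAIM (what is proved, stated in full; the proofs are below) =====
def Claim_equal_deduplicate_wines_py : Prop := ∀ (all_wines : List (List (String × String))), Dom_deduplicate_wines_py all_wines → Spec_deduplicate_wines_py all_wines (deduplicate_wines_py all_wines)

-- ===== LEMMAS AND PROOFS =====

def pvKeys (L : List (List (String × String))) : List (String × String) := L.foldl pvBKeyStep []

-- the wines of L whose key is k, as dicts, in encounter order
def pvGroup (L : List (List (String × String))) (k : String × String) : List (PySem.Dict String String) :=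
  (L.filter (fun wine => pvWineKey wine == some k)).map PySem.Dict.ofList

-- left fold of a whole group into its head
def pvRed (l : List (PySem.Dict String String)) : PySem.Dict String String :=
  match l with
  | [] => PySem.Dict.empty
  | h :: t => t.foldl pvBMergeFields h

-- A's key-wise merge loop (over wine's keys with lookups) equals B's items-wise loop
theorem pvMerge_eq (ex : PySem.Dict String String) (wine : List (String × String)) :
    pvAMergeLoop ex (PySem.Dict.ofList wine) = pvBMergeFields ex (PySem.Dict.ofList wine) := by
  set w := PySem.Dict.ofList wine with hw
  have hnd : w.keys.Nodup := PySem.Dict.nodup_keys_ofList wine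
  rw [pvAMergeLoop, pvBMergeFields]
  simp only [PySem.Dict.keys, List.foldl_map]
  refine PySem.List.foldl_congr_mem _ _ _ _ ?_
  intro acc p hp
  have : w.getD p.1 "" = p.2 := by
    obtain ⟨a, b⟩ := p
    exact PySem.Dict.getD_of_mem_items w hp hnd ""
  rw [this]

-- pvAStep expressed through pvWineKey
theorem pvAStep_eq (seen : PySem.Dict (String × String) (PySem.Dict String String))
    (wine : List (String × String)) :
    pvAStep seen wine =
      match pvWineKey wine with
      | none => seen
      | some key =>
          if !(seen.contains key) then seen.insert key (PySem.Dict.ofList wine)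
          else seen.insert key (pvAMergeLoop (seen.getD key PySem.Dict.empty) (PySem.Dict.ofList wine)) := by
  rw [pvAStep, pvWineKey]
  by_cases h : PySem.Str.lower (PySem.Str.strip (((PySem.Dict.ofList wine).get? "name").getD "")) = ""
  · simp [h]
  · simp [h]

-- membership in the collected keys = some wine has that key
theorem mem_pvKeyFold (L : List (List (String × String))) (ks : List (String × String))
    (k : String × String) :
    k ∈ L.foldl pvBKeyStep ks ↔ k ∈ ks ∨ ∃ wine ∈ L, pvWineKey wine = some k := by
  induction L generalizing ks with
  | nil => simp
  | cons x xs ih =>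
    rw [List.foldl_cons, ih]
    constructor
    · rintro (h | h)
      · rcases hx : pvWineKey x with _ | kx
        · rw [pvBKeyStep, hx] at h; exact Or.inl h
        · rw [pvBKeyStep, hx] at h
          simp only at h
          by_cases hc : List.contains ks kx
          · rw [if_pos hc] at h; exact Or.inl h
          · rw [if_neg hc] at h
            rcases List.mem_append.mp h with h | h
            · exact Or.inl h
            · right; exact ⟨x, List.mem_cons_self, by simp at h; rw [hx, h]⟩
      · obtain ⟨w, hw, hkw⟩ := h
        exact Or.inr ⟨w, List.mem_cons_of_mem _ hw, hkw⟩
    · rintro (h | ⟨w, hw, hkw⟩)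
      · left
        rcases hx : pvWineKey x with _ | kx
        · rw [pvBKeyStep, hx]; exact h
        · rw [pvBKeyStep, hx]
          simp only
          by_cases hc : List.contains ks kx
          · rw [if_pos hc]; exact h
          · rw [if_neg hc]; exact List.mem_append_left _ h
      · rcases List.mem_cons.mp hw with rfl | hw'
        · left
          rw [pvBKeyStep, hkw]
          simp only
          by_cases hc : List.contains ks k
          · rw [if_pos hc]; exact List.mem_of_elem_eq_true hc
          · rw [if_neg hc]; simp
        · exact Or.inr ⟨w, hw', hkw⟩

theorem mem_pvKeys (L : List (List (String × String))) (k : String × String) :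
    k ∈ pvKeys L ↔ ∃ wine ∈ L, pvWineKey wine = some k := by
  rw [pvKeys, mem_pvKeyFold]; simp

theorem nodup_pvKeyFold (L : List (List (String × String))) (ks : List (String × String))
    (hnd : ks.Nodup) : (L.foldl pvBKeyStep ks).Nodup := by
  induction L generalizing ks with
  | nil => exact hnd
  | cons x xs ih =>
    rw [List.foldl_cons]
    refine ih _ ?_
    rcases hx : pvWineKey x with _ | kx
    · rw [pvBKeyStep, hx]; exact hnd
    · rw [pvBKeyStep, hx]
      simp only
      by_cases hc : List.contains ks kx
      · rw [if_pos hc]; exact hnd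
      · rw [if_neg hc]
        refine List.nodup_append.mpr ⟨hnd, List.nodup_singleton kx, ?_⟩
        intro a ha b hb
        have : b = kx := by simpa using hb
        subst this
        rintro rfl
        exact absurd (List.elem_eq_true_of_mem ha) (by simpa using hc)

-- pvKeys and pvGroup over an appended element
theorem pvKeys_append (L : List (List (String × String))) (x : List (String × String)) :
    pvKeys (L ++ [x]) = pvBKeyStep (pvKeys L) x := by
  rw [pvKeys, pvKeys, List.foldl_append, List.foldl_cons, List.foldl_nil]

theorem pvGroup_append (L : List (List (String × String))) (x : List (String × String))
    (k : String × String) :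
    pvGroup (L ++ [x]) k =
      pvGroup L k ++ (if pvWineKey x == some k then [PySem.Dict.ofList x] else []) := by
  by_cases h : (pvWineKey x == some k) = true
  · rw [if_pos h, pvGroup, pvGroup, List.filter_append, List.filter_cons, if_pos h,
      List.filter_nil, List.map_append, List.map_cons, List.map_nil]
  · rw [if_neg h, List.append_nil, pvGroup, pvGroup, List.filter_append, List.filter_cons,
      if_neg h, List.filter_nil, List.append_nil]

theorem pvGroup_empty_of_not_mem (L : List (List (String × String))) (k : String × String)
    (h : k ∉ pvKeys L) : pvGroup L k = [] := by
  rw [pvGroup, List.map_eq_nil_iff, List.filter_eq_nil_iff]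
  intro w hw hk
  exact h ((mem_pvKeys L k).mpr ⟨w, hw, by simpa using hk⟩)

-- the invariant: A's dict after the fold is the key list paired with the reduced groups
set_option maxHeartbeats 1000000 in
theorem pvA_items (L : List (List (String × String))) :
    (L.foldl pvAStep PySem.Dict.empty).items =
      (pvKeys L).map (fun k => (k, pvRed (pvGroup L k))) := by
  induction L using List.reverseRecOn with
  | nil => rfl
  | append_singleton L x ih =>
    have hndK : (pvKeys L).Nodup := nodup_pvKeyFold L [] (List.nodup_nil)
    have hkeys : (L.foldl pvAStep PySem.Dict.empty).keys = pvKeys L := by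
      simp only [PySem.Dict.keys, ih, List.map_map]
      exact List.map_id'' (fun a => rfl) _
    have hndD : (L.foldl pvAStep PySem.Dict.empty).keys.Nodup := by rw [hkeys]; exact hndK
    rw [List.foldl_append, List.foldl_cons, List.foldl_nil, pvAStep_eq, pvKeys_append, pvBKeyStep]
    rcases hx : pvWineKey x with _ | k
    · -- skipped wine: nothing changes
      dsimp only
      rw [ih]
      refine (List.map_congr_left ?_).symm
      intro k hk
      rw [pvGroup_append, hx]
      simp
    · dsimp only
      have hcd : (L.foldl pvAStep PySem.Dict.empty).contains k = decide (k ∈ pvKeys L) := by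
        rw [PySem.Dict.contains_eq_decide_mem_keys, hkeys]
      by_cases hmem : k ∈ pvKeys L
      · -- existing key: A merges in place, the group gains x at the end
        have hc : (L.foldl pvAStep PySem.Dict.empty).contains k = true := by
          rw [hcd]; exact decide_eq_true hmem
        have hlc : List.contains (pvKeys L) k = true := List.elem_eq_true_of_mem hmem
        rw [hc, if_pos hlc]
        simp only [Bool.not_true, Bool.false_eq_true, if_false]
        have hgd : (L.foldl pvAStep PySem.Dict.empty).getD k PySem.Dict.empty = pvRed (pvGroup L k) := by
          refine PySem.Dict.getD_of_mem_items _ ?_ hndD _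
          rw [ih]
          exact List.mem_map.mpr ⟨k, hmem, rfl⟩
        rw [PySem.Dict.items_insert_of_contains _ _ hc, ih, List.map_map]
        refine List.map_congr_left ?_
        intro k' hk'
        simp only [Function.comp]
        by_cases hkk : k' = k
        · subst hkk
          rw [if_pos (by simp)]
          have hgne : pvGroup L k' ≠ [] := by
            intro hnil
            obtain ⟨w, hw, hkw⟩ := (mem_pvKeys L k').mp hk'
            have : PySem.Dict.ofList w ∈ pvGroup L k' :=
              List.mem_map.mpr ⟨w, List.mem_filter.mpr ⟨hw, by simp [hkw]⟩, rfl⟩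
            rw [hnil] at this; exact absurd this (List.not_mem_nil)
          obtain ⟨h, t, hg⟩ : ∃ h t, pvGroup L k' = h :: t := by
            rcases hg2 : pvGroup L k' with _ | ⟨h, t⟩
            · exact absurd hg2 hgne
            · exact ⟨h, t, rfl⟩
          rw [pvGroup_append, hx, if_pos (by simp), hgd, hg, pvMerge_eq, List.cons_append]
          dsimp only [pvRed]
          rw [List.foldl_append, List.foldl_cons, List.foldl_nil]
        · rw [if_neg (by simp [hkk]), pvGroup_append, hx,
            if_neg (by simp; exact fun h => hkk h.symm), List.append_nil]
      · -- fresh key: A appends, the key list appends, the new group is [x]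
        have hc : (L.foldl pvAStep PySem.Dict.empty).contains k = false := by
          rw [hcd]; exact decide_eq_false hmem
        have hlc : List.contains (pvKeys L) k = false := by
          simpa using hmem
        rw [hc, hlc]
        simp only [Bool.not_false, Bool.false_eq_true, if_true, if_false]
        rw [PySem.Dict.items_insert_of_not_contains _ _ hc, ih, List.map_append]
        refine congr_arg₂ (· ++ ·) ?_ ?_
        · refine (List.map_congr_left ?_).symm
          intro k' hk'
          rw [pvGroup_append, hx, if_neg (by simp; rintro rfl; exact hmem hk'), List.append_nil]
        · rw [List.map_singleton, pvGroup_append, hx, if_pos (by simp),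
            pvGroup_empty_of_not_mem L k hmem]
          rfl

-- B's inner per-key fold computes the reduction of the group (as an Option)
theorem pvB_inner (L : List (List (String × String))) (k : String × String) :
    L.foldl (fun acc wine =>
        if pvWineKey wine == some k then pvBMergeOpt acc (PySem.Dict.ofList wine) else acc) none =
      match pvGroup L k with
      | [] => none
      | h :: t => some (t.foldl pvBMergeFields h) := by
  have h1 : ∀ (g : List (PySem.Dict String String)) (m : PySem.Dict String String),
      g.foldl pvBMergeOpt (some m) = some (g.foldl pvBMergeFields m) := by
    intro g
    induction g with
    | nil => intro m; rfl
    | cons y ys ih => intro m; rw [List.foldl_cons, List.foldl_cons, pvBMergeOpt]; exact ih _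
  have h2 : (pvGroup L k).foldl pvBMergeOpt none =
      L.foldl (fun acc wine =>
        if pvWineKey wine == some k then pvBMergeOpt acc (PySem.Dict.ofList wine) else acc) none := by
    rw [pvGroup, List.foldl_map, List.foldl_filter]
  rw [← h2]
  rcases pvGroup L k with _ | ⟨h, t⟩
  · rfl
  · rw [List.foldl_cons, pvBMergeOpt]
    exact h1 t h

-- ===== VERDICT (by name: the statement is the Claim_ definition above) =====
theorem deduplicate_wines_py_spec : Claim_equal_deduplicate_wines_py := by
  intro all_wines _
  unfold Spec_deduplicate_wines_py deduplicate_wines_py deduplicate_wines_py_alt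
  simp only [PySem.Dict.values, pvA_items, List.map_map]
  rw [show all_wines.foldl pvBKeyStep [] = pvKeys all_wines from rfl]
  refine List.map_congr_left ?_
  intro k hk
  rw [pvB_inner]
  have hgne : pvGroup all_wines k ≠ [] := by
    intro hnil
    obtain ⟨w, hw, hkw⟩ := (mem_pvKeys all_wines k).mp hk
    have : PySem.Dict.ofList w ∈ pvGroup all_wines k :=
      List.mem_map.mpr ⟨w, List.mem_filter.mpr ⟨hw, by simp [hkw]⟩, rfl⟩
    rw [hnil] at this; exact absurd this (List.not_mem_nil)
  rcases hg : pvGroup all_wines k with _ | ⟨h, t⟩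
  · exact absurd hg hgne
  · simp [Function.comp, pvRed, hg]
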